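-- pv_equiv track=rewrite | github.com/jamie-jjd/2021_spring_introduction_to_data_structure | practice/13/solution.py | Check
-- ===== SOURCE A (Python) =====
-- def lower_bound(sa, M, s):
--     L, R = -1, len(sa) - 1
--     if M[sa[-1]:] < s:
--         return M[sa[-1]:]
--     while L+1<R:
--         mid = (L+R)//2
--         if M[sa[mid]:] < s:
--             L=mid
--         else:
--             R=mid
--     return M[sa[R]:]
--
-- def Check(N, m, Ms):
--     res = []
--     sa = sorted(range(len(N)), key=lambda i: N[i:])
--     for s in Ms:
--         c = lower_bound(sa, N, s)
--         if c[:min(len(c), len(s))] == s: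
--             res.append(1)
--         else:
--             res.append(0)
--     return res
-- ===== SOURCE B (Python) =====
-- def Check(N, m, Ms):
--     return [1 if s in N else 0 for s in Ms]
-- ===== Notes on version B (the rewrite author's own statement) =====
-- stated objective: simpler
-- what changed: A builds a suffix array by sorting whole suffix strings and binary-searches it with slice comparisons per query; B drops the index entirely and answers each query with Python's native substring test (s in N).
import Mathlib
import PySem

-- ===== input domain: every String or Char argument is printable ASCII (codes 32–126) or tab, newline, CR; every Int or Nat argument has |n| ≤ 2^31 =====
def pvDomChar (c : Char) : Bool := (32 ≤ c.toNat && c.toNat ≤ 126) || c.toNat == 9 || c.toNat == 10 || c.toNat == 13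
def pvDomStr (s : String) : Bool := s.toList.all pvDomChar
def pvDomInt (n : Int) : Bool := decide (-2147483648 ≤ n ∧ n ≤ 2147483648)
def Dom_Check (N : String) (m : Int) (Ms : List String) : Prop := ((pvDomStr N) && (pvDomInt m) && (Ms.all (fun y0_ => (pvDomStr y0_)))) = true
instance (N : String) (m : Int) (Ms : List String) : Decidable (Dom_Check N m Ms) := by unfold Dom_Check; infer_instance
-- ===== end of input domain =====

-- B replaces A's hand-built suffix array + binary search by a direct substring test per query (simpler, index-free); proved equal wherever A returns.


-- ===== PORT A =====
-- M[i:] — the suffix slice A takes in lower_bound and in the sort key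
def pySuffix (M : String) (i : Int) : String := PySem.Str.slice M (some i) none

-- the 'while L+1<R' binary-search loop of lower_bound
def lbLoop (sa : List Int) (M s : String) (L R : Int) : Int :=
  if L + 1 < R then
    let mid := PySem.Int.floordiv (L + R) 2
    if pySuffix M (PySem.List.pyGetD sa mid 0) < s then
      lbLoop sa M s mid R
    else
      lbLoop sa M s L mid
  else R
termination_by (R - L).toNat
decreasing_by
  all_goals
    have h2 : PySem.Int.floordiv (L + R) 2 = (L + R) / 2 :=
      PySem.Int.floordiv_eq_ediv_of_pos (by norm_num)
    simp only [mid, h2] at *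
  · omega
  · omega

def lowerBound (sa : List Int) (M s : String) : String :=
  if pySuffix M (PySem.List.pyGetD sa (-1) 0) < s then
    pySuffix M (PySem.List.pyGetD sa (-1) 0)
  else
    pySuffix M (PySem.List.pyGetD sa (lbLoop sa M s (-1) (PySem.List.len sa - 1)) 0)

def Check (N : String) (m : Int) (Ms : List String) : List Int :=
  let sa := PySem.List.sorted (PySem.List.pyRange 0 (PySem.Str.len N) 1) (fun i => pySuffix N i) false
  Ms.foldl (fun res s =>
    let c := lowerBound sa N s
    if PySem.Str.slice c none (some (min (PySem.Str.len c) (PySem.Str.len s))) = s then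
      res ++ [1]
    else
      res ++ [0]) []

-- ===== PORT B =====
def Check_alt (N : String) (m : Int) (Ms : List String) : List Int :=
  Ms.map (fun s => if PySem.Str.isIn s N then 1 else 0)

-- ===== PRECONDITION & SPEC =====
-- Pre_ excludes only the inputs on which A raises: with N = "" the suffix array is empty and
-- lower_bound's sa[-1] raises IndexError as soon as one query is processed.
def Pre_Check (N : String) (m : Int) (Ms : List String) : Prop := N = "" → Ms = []
instance (N : String) (m : Int) (Ms : List String) : Decidable (Pre_Check N m Ms) := by unfold Pre_Check; infer_instance
def pvWitness_Check : String × Int × List String := ("banana", 3, ["ana", "nab", "", "banana"])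

def Spec_Check (N : String) (m : Int) (Ms : List String) (out : List Int) : Prop := out = Check_alt N m Ms
instance (N : String) (m : Int) (Ms : List String) (out : List Int) : Decidable (Spec_Check N m Ms out) := by unfold Spec_Check; infer_instance

-- ===== CLAIM (what is proved, stated in full; the proofs are below) =====
def Claim_equal_Check : Prop := ∀ (N : String) (m : Int) (Ms : List String), Dom_Check N m Ms → Pre_Check N m Ms → Spec_Check N m Ms (Check N m Ms)

-- ===== LEMMAS AND PROOFS =====

theorem lbLoop_spec (sa : List Int) (N s : String)
    (hmono : ∀ p q : Int, 0 ≤ p → p ≤ q → q < (sa.length : Int) →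
      pySuffix N (PySem.List.pyGetD sa p 0) ≤ pySuffix N (PySem.List.pyGetD sa q 0)) :
    ∀ (L R : Int), -1 ≤ L → L < R → R < (sa.length : Int) →
    (∀ j : Int, 0 ≤ j → j ≤ L → pySuffix N (PySem.List.pyGetD sa j 0) < s) →
    ¬ pySuffix N (PySem.List.pyGetD sa R 0) < s →
    L < lbLoop sa N s L R ∧ lbLoop sa N s L R ≤ R ∧
    (∀ j : Int, 0 ≤ j → j < lbLoop sa N s L R → pySuffix N (PySem.List.pyGetD sa j 0) < s) ∧
    ¬ pySuffix N (PySem.List.pyGetD sa (lbLoop sa N s L R) 0) < s := by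
  suffices H : ∀ n : ℕ, ∀ L R : ℤ, (R - L).toNat ≤ n → -1 ≤ L → L < R → R < (sa.length : Int) →
      (∀ j : Int, 0 ≤ j → j ≤ L → pySuffix N (PySem.List.pyGetD sa j 0) < s) →
      ¬ pySuffix N (PySem.List.pyGetD sa R 0) < s →
      L < lbLoop sa N s L R ∧ lbLoop sa N s L R ≤ R ∧
      (∀ j : Int, 0 ≤ j → j < lbLoop sa N s L R → pySuffix N (PySem.List.pyGetD sa j 0) < s) ∧
      ¬ pySuffix N (PySem.List.pyGetD sa (lbLoop sa N s L R) 0) < s by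
    exact fun L R h1 h2 h3 h4 h5 => H (R - L).toNat L R le_rfl h1 h2 h3 h4 h5
  intro n
  induction n with
  | zero => intro L R hn h1 h2; omega
  | succ n ih =>
    intro L R hn hLneg hLR hRlen hlt hge
    have hmid : PySem.Int.floordiv (L + R) 2 = (L + R) / 2 :=
      PySem.Int.floordiv_eq_ediv_of_pos (by norm_num)
    by_cases hc : L + 1 < R
    · rw [lbLoop]
      simp only [if_pos hc]
      have hb : L < PySem.Int.floordiv (L + R) 2 ∧ PySem.Int.floordiv (L + R) 2 < R := by
        rw [hmid]; omega
      by_cases hbr : pySuffix N (PySem.List.pyGetD sa (PySem.Int.floordiv (L + R) 2) 0) < s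
      · simp only [if_pos hbr]
        exact ih (PySem.Int.floordiv (L + R) 2) R (by omega) (by omega) hb.2 hRlen
          (fun j hj0 hjm => lt_of_le_of_lt (hmono j _ hj0 hjm (by omega)) hbr) hge
        |>.imp (fun h => lt_trans hb.1 h) id
      · simp only [if_neg hbr]
        obtain ⟨o1, o2, o3, o4⟩ := ih L (PySem.Int.floordiv (L + R) 2) (by omega) hLneg hb.1
          (by omega) hlt hbr
        exact ⟨o1, le_trans o2 (le_of_lt hb.2), o3, o4⟩
    · rw [lbLoop]
      simp only [if_neg hc]
      exact ⟨hLR, le_refl R, fun j hj0 hjR => hlt j hj0 (by omega), hge⟩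

theorem pv_not_append_lt_self (s r : List Char) : ¬ (s ++ r < s) := by
  induction s with
  | nil => simpa using List.not_lt_nil r
  | cons a t ih =>
    intro h
    rw [List.cons_append, List.cons_lt_cons_iff] at h
    rcases h with h | ⟨-, h⟩
    · exact lt_irrefl a h
    · exact ih h

theorem pv_prefix_of_between (s c r : List Char) (h1 : ¬ c < s) (h2 : ¬ s ++ r < c) :
    s <+: c := by
  induction s generalizing c with
  | nil => exact List.nil_prefix
  | cons a t ih =>
    cases c with
    | nil => exact absurd (List.nil_lt_cons a t) h1
    | cons b c' =>
      rw [List.cons_lt_cons_iff] at h1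
      rw [List.cons_append, List.cons_lt_cons_iff] at h2
      rcases lt_trichotomy a b with hab | hab | hab
      · exact absurd (Or.inl hab) h2
      · subst hab
        refine List.cons_prefix_cons.mpr ⟨rfl, ih c' ?_ ?_⟩
        · intro h; exact h1 (Or.inr ⟨rfl, h⟩)
        · intro h; exact h2 (Or.inr ⟨rfl, h⟩)
      · exact absurd (Or.inl hab) h1

theorem pv_take_min_eq_iff (c s : List Char) :
    c.take (min c.length s.length) = s ↔ s <+: c := by
  constructor
  · intro h
    rcases le_or_gt s.length c.length with hle | hgt
    · rw [min_eq_right hle] at h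
      exact List.prefix_iff_eq_take.mpr h.symm
    · rw [min_eq_left (le_of_lt hgt), List.take_length] at h
      subst h; simp at hgt
  · intro h
    have hl : s.length ≤ c.length := h.length_le
    rw [min_eq_right hl]
    exact (List.prefix_iff_eq_take.mp h).symm

theorem pv_query (N s : String) (hN : N ≠ "") :
    (let sa := PySem.List.sorted (PySem.List.pyRange 0 (PySem.Str.len N) 1) (fun i => pySuffix N i) false
     let c := lowerBound sa N s
     (if PySem.Str.slice c none (some (min (PySem.Str.len c) (PySem.Str.len s))) = s then (1 : Int) else 0))
    = (if PySem.Str.isIn s N then (1 : Int) else 0) := by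
  have hNl : N.toList ≠ [] := fun h => hN (String.toList_eq_nil_iff.mp h)
  have hn0 : 0 < N.toList.length := List.length_pos_iff.mpr hNl
  set sa := PySem.List.sorted (PySem.List.pyRange 0 (PySem.Str.len N) 1) (fun i => pySuffix N i) false with hsadef
  have hlen : sa.length = N.toList.length := by
    rw [hsadef, PySem.List.length_sorted, PySem.List.length_pyRange_one, PySem.Str.len_eq]
    omega
  have hne : sa ≠ [] := by
    intro h
    rw [h] at hlen
    have : N.toList.length = 0 := by simpa using hlen.symm
    omega
  have hidx : ∀ i : Int, 0 ≤ i → i < (sa.length : Int) →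
      0 ≤ PySem.List.pyGetD sa i 0 ∧ PySem.List.pyGetD sa i 0 < (N.toList.length : Int) := by
    intro i h0 hl
    have hm : PySem.List.pyGetD sa i 0
        ∈ PySem.List.sorted (PySem.List.pyRange 0 (PySem.Str.len N) 1) (fun i => pySuffix N i) false :=
      PySem.List.pyGetD_mem sa 0 (by constructor <;> omega)
    rw [PySem.List.mem_sorted, PySem.List.mem_pyRange_one, PySem.Str.len_eq] at hm
    exact hm
  have hmono : ∀ p q : Int, 0 ≤ p → p ≤ q → q < (sa.length : Int) →
      pySuffix N (PySem.List.pyGetD sa p 0) ≤ pySuffix N (PySem.List.pyGetD sa q 0) := by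
    intro p q h0 hpq hq
    rw [PySem.List.pyGetD_eq_getElem sa 0 h0 (by omega),
        PySem.List.pyGetD_eq_getElem sa 0 (by omega) hq]
    have := PySem.List.key_sorted_getElem_mono (PySem.List.pyRange 0 (PySem.Str.len N) 1)
      (fun i => pySuffix N i) (p := p.toNat) (q := q.toNat) (by omega)
      (by simp only [← hsadef]; omega)
    simp only [← hsadef] at this
    exact this
  have hsuf : ∀ i : Int, 0 ≤ i → (pySuffix N i).toList = N.toList.drop i.toNat := by
    intro i h0
    simp only [pySuffix, PySem.Str.toList_slice, PySem.Chars.slice_eq_listSlice]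
    exact PySem.List.slice_from N.toList h0
  have hlast : PySem.List.pyGetD sa (-1) 0 = PySem.List.pyGetD sa ((sa.length : Int) - 1) 0 := by
    rw [PySem.List.pyGetD_neg_one sa 0 hne, List.getLast_eq_getElem,
        PySem.List.pyGetD_eq_getElem sa 0 (by omega) (by omega)]
    congr 1
    omega
  set c := lowerBound sa N s with hcdef
  have hcunf : c = if pySuffix N (PySem.List.pyGetD sa (-1) 0) < s then
      pySuffix N (PySem.List.pyGetD sa (-1) 0)
    else
      pySuffix N (PySem.List.pyGetD sa (lbLoop sa N s (-1) ((sa.length : Int) - 1)) 0) := by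
    rw [hcdef, lowerBound, PySem.List.len_eq]
  have hcsuffix : ∃ i : Int, 0 ≤ i ∧ i < (N.toList.length : Int) ∧ c = pySuffix N i := by
    rw [hcunf]
    split
    · refine ⟨PySem.List.pyGetD sa (-1) 0, ?_, ?_, rfl⟩
      · rw [hlast]; exact (hidx _ (by omega) (by omega)).1
      · rw [hlast]; exact (hidx _ (by omega) (by omega)).2
    · rename_i hearly
      rw [hlast] at hearly
      obtain ⟨o1, o2, o3, o4⟩ := lbLoop_spec sa N s hmono (-1) ((sa.length : Int) - 1)
        (by norm_num) (by omega) (by omega) (by intro j h0 hj; omega) hearly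
      exact ⟨_, (hidx _ (by omega) (by omega)).1, (hidx _ (by omega) (by omega)).2, rfl⟩
  have hbridge : s.toList <+: c.toList ↔ s.toList <:+: N.toList := by
    constructor
    · intro hp
      obtain ⟨i, h0, hi, hci⟩ := hcsuffix
      refine List.infix_iff_prefix_suffix.mpr ⟨c.toList, hp, ?_⟩
      rw [hci, hsuf i h0]
      exact List.drop_suffix _ _
    · intro hinf
      by_cases hs : s.toList = []
      · rw [hs]; exact List.nil_prefix
      · have : ∃ j, s.toList <+: N.toList.drop j :=
          (PySem.Chars.exists_prefix_drop_iff_isIn s.toList N.toList).mpr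
            ((PySem.Chars.isIn_iff_infix _ _).mpr hinf)
        obtain ⟨j, hj⟩ := this
        have hjlt : j < N.toList.length := by
          by_contra hge
          rw [List.drop_eq_nil_of_le (by omega)] at hj
          exact hs (List.prefix_nil.mp hj)
        have hjmem : (j : Int) ∈ sa := by
          rw [hsadef, PySem.List.mem_sorted, PySem.List.mem_pyRange_one, PySem.Str.len_eq]
          omega
        obtain ⟨k, hk, hkj⟩ := List.mem_iff_getElem.mp hjmem
        have hgetk : PySem.List.pyGetD sa (k : Int) 0 = (j : Int) := by
          rw [PySem.List.pyGetD_eq_getElem sa 0 (by omega) (by omega)]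
          simpa using hkj
        have hsleu : ¬ pySuffix N (j : Int) < s := by
          rw [String.lt_iff_toList_lt, hsuf _ (by omega)]
          obtain ⟨r, hr⟩ := hj
          rw [Int.toNat_natCast, ← hr]
          exact pv_not_append_lt_self _ _
        have hearly : ¬ pySuffix N (PySem.List.pyGetD sa ((sa.length : Int) - 1) 0) < s := by
          intro hlt
          have hle := hmono (k : Int) ((sa.length : Int) - 1) (by omega) (by omega) (by omega)
          rw [hgetk] at hle
          exact hsleu (lt_of_le_of_lt hle hlt)
        obtain ⟨o1, o2, o3, o4⟩ := lbLoop_spec sa N s hmono (-1) ((sa.length : Int) - 1)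
          (by norm_num) (by omega) (by omega) (by intro j' h0 hj'; omega) hearly
        set Rf := lbLoop sa N s (-1) ((sa.length : Int) - 1) with hRf
        have hcRf : c = pySuffix N (PySem.List.pyGetD sa Rf 0) := by
          rw [hcunf, if_neg (by rw [hlast]; exact hearly)]
        have hkRf : Rf ≤ (k : Int) := by
          by_contra hlt
          exact hsleu (by rw [← hgetk]; exact o3 (k : Int) (by omega) (by omega))
        have hcle : c ≤ pySuffix N (j : Int) := by
          rw [hcRf, ← hgetk]
          exact hmono Rf (k : Int) (by omega) hkRf (by omega)
        have hslec : ¬ c.toList < s.toList := by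
          rw [← String.lt_iff_toList_lt, hcRf]
          exact o4
        obtain ⟨r, hr⟩ := hj
        have hcler : ¬ s.toList ++ r < c.toList := by
          have := hcle
          rw [String.le_iff_toList_le, hsuf _ (by omega), Int.toNat_natCast, ← hr] at this
          exact not_lt.mpr this
        exact pv_prefix_of_between _ _ r hslec hcler
  have hmin : (min (PySem.Str.len c) (PySem.Str.len s)).toNat = min c.toList.length s.toList.length := by
    rw [PySem.Str.len_eq, PySem.Str.len_eq]
    omega
  have hto : (PySem.Str.slice c none (some (min (PySem.Str.len c) (PySem.Str.len s)))).toList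
      = c.toList.take (min c.toList.length s.toList.length) := by
    rw [PySem.Str.toList_slice, PySem.Chars.slice_eq_listSlice,
        PySem.List.slice_to _ (by rw [PySem.Str.len_eq, PySem.Str.len_eq]; omega), hmin]
  have hiff : (PySem.Str.slice c none (some (min (PySem.Str.len c) (PySem.Str.len s))) = s)
      ↔ (PySem.Str.isIn s N = true) := by
    rw [PySem.Str.isIn_iff_infix, ← hbridge, ← pv_take_min_eq_iff]
    constructor
    · intro h
      rw [← hto]
      exact congrArg String.toList h
    · intro h
      exact String.toList_inj.mp (hto.trans h)
  simp only []
  rw [if_congr hiff rfl rfl]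

-- ===== VERDICT (by name: the statement is the Claim_ definition above) =====
theorem Check_spec : Claim_equal_Check := by
  intro N m Ms _ hpre
  unfold Spec_Check Check Check_alt
  by_cases hN : N = ""
  · subst hN; rw [hpre rfl]; rfl
  · have hbody : (fun (res : List Int) (s : String) =>
        let c := lowerBound (PySem.List.sorted (PySem.List.pyRange 0 (PySem.Str.len N) 1) (fun i => pySuffix N i) false) N s
        if PySem.Str.slice c none (some (min (PySem.Str.len c) (PySem.Str.len s))) = s then res ++ [(1:Int)] else res ++ [0])
      = (fun res s => res ++ [if PySem.Str.isIn s N then (1:Int) else 0]) := by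
      funext res s
      have := pv_query N s hN
      simp only at this
      show (if PySem.Str.slice (lowerBound (PySem.List.sorted (PySem.List.pyRange 0 (PySem.Str.len N) 1) (fun i => pySuffix N i) false) N s) none (some (min (PySem.Str.len (lowerBound (PySem.List.sorted (PySem.List.pyRange 0 (PySem.Str.len N) 1) (fun i => pySuffix N i) false) N s)) (PySem.Str.len s))) = s then res ++ [(1:Int)] else res ++ [0]) = _
      rw [← this]
      split <;> rfl
    simp only [hbody, PySem.List.foldl_append_singleton_eq_map, List.nil_append]
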